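-- pv_equiv track=rewrite | github.com/rachtibat/crp-backend | CRP_backend/old/core/model_utils.py | find_overlap_with_output
-- ===== SOURCE A (Python) =====
-- def find_overlap_with_output(node_inputs: list, layer_outputs):
--     """
--     used only in find_next_layers.
--     Helper function to find a valid connection between two nodes
--     """
--
--     hit_bool = False
--
--     for name in layer_outputs:
--
--         node_outputs = layer_outputs[name]
--         if set(node_inputs) & set(node_outputs):
--             # if hit, not input node
--             hit_bool = True
--             break
--
--     return hit_bool
-- ===== SOURCE B (Python) =====
-- def find_overlap_with_output(node_inputs: list, layer_outputs):
--     """Aggregate all layer outputs into one set, then do a single intersection."""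
--     inputs = set(node_inputs)
--     allout = set()
--     for name in layer_outputs:
--         allout.update(layer_outputs[name])
--     return bool(inputs & allout)
-- ===== Notes on version B (the rewrite author's own statement) =====
-- stated objective: simpler
-- what changed: B builds the union of all layer outputs once and returns a single intersection test, instead of A's per-layer set intersection with an early break.
import Mathlib
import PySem

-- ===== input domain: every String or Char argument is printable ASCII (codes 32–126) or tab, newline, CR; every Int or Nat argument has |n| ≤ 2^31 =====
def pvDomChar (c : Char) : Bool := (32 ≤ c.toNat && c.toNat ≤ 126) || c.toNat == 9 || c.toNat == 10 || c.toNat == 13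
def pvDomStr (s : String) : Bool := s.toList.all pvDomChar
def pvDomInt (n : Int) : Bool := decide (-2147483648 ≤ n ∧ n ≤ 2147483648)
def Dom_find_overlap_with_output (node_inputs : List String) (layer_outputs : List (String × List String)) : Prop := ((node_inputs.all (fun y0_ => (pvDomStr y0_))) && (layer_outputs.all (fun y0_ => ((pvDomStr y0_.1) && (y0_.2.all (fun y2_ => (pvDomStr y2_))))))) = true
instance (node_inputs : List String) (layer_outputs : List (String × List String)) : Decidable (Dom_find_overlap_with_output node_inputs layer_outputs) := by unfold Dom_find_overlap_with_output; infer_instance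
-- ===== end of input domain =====

-- B replaces A's per-layer intersection test with early break by one union of all
-- layer outputs followed by a single intersection test (objective: simpler).

-- ===== PORT A =====
-- loop 'for name in layer_outputs: … if set(node_inputs) & set(node_outputs): hit_bool = True; break'
def findOverlapLoopA (node_inputs : List String) : List (String × List String) → Bool
  | [] => false
  | (_, node_outputs) :: rest =>
      if !(PySem.Set.inter (PySem.Set.ofList node_inputs) (PySem.Set.ofList node_outputs)).isEmpty then
        true
      else
        findOverlapLoopA node_inputs rest

def find_overlap_with_output (node_inputs : List String) (layer_outputs : List (String × List String)) : Bool :=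
  findOverlapLoopA node_inputs layer_outputs

-- ===== PORT B =====
def find_overlap_with_output_alt (node_inputs : List String) (layer_outputs : List (String × List String)) : Bool :=
  let inputs : PySem.Set String := PySem.Set.ofList node_inputs
  let allout : PySem.Set String :=
    layer_outputs.foldl (fun s p => PySem.Set.update s p.2) PySem.Set.empty
  !(PySem.Set.inter inputs allout).isEmpty

-- ===== PRECONDITION & SPEC =====
def Spec_find_overlap_with_output (node_inputs : List String) (layer_outputs : List (String × List String)) (out : Bool) : Prop := out = find_overlap_with_output_alt node_inputs layer_outputs
instance (node_inputs : List String) (layer_outputs : List (String × List String)) (out : Bool) : Decidable (Spec_find_overlap_with_output node_inputs layer_outputs out) := by unfold Spec_find_overlap_with_output; infer_instance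

-- ===== CLAIM (what is proved, stated in full; the proofs are below) =====
def Claim_equal_find_overlap_with_output : Prop := ∀ (node_inputs : List String) (layer_outputs : List (String × List String)), Dom_find_overlap_with_output node_inputs layer_outputs → Spec_find_overlap_with_output node_inputs layer_outputs (find_overlap_with_output node_inputs layer_outputs)

-- ===== LEMMAS AND PROOFS =====

theorem ne_nil_iff_exists_mem' (l : List String) : l ≠ [] ↔ ∃ x, x ∈ l := by
  cases l <;> simp

theorem inter_nonempty_iff (s t : List String) :
    (!(PySem.Set.inter (PySem.Set.ofList s) (PySem.Set.ofList t)).isEmpty) = true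
      ↔ ∃ x, x ∈ s ∧ x ∈ t := by
  rw [Bool.not_eq_eq_eq_not, Bool.not_true, List.isEmpty_eq_false_iff,
    ne_nil_iff_exists_mem']
  constructor
  · rintro ⟨x, hx⟩
    have := (PySem.Set.mem_inter (s := PySem.Set.ofList s) (t := PySem.Set.ofList t) (y := x)).1 hx
    exact ⟨x, (PySem.Set.mem_ofList _ _).1 this.1, (PySem.Set.mem_ofList _ _).1 this.2⟩
  · rintro ⟨x, hs, ht⟩
    exact ⟨x, (PySem.Set.mem_inter _ _ _).2 ⟨(PySem.Set.mem_ofList _ _).2 hs, (PySem.Set.mem_ofList _ _).2 ht⟩⟩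

theorem loopA_iff (ni : List String) (lo : List (String × List String)) :
    findOverlapLoopA ni lo = true ↔ ∃ p ∈ lo, ∃ x, x ∈ ni ∧ x ∈ p.2 := by
  induction lo with
  | nil => simp [findOverlapLoopA]
  | cons p rest ih =>
      obtain ⟨name, outs⟩ := p
      by_cases h : (!(PySem.Set.inter (PySem.Set.ofList ni) (PySem.Set.ofList outs)).isEmpty) = true
      · simp only [findOverlapLoopA, h, if_true]
        have hx := (inter_nonempty_iff ni outs).1 h
        simpa using Or.inl hx
      · have hno : ¬ ∃ x, x ∈ ni ∧ x ∈ outs := by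
          intro hx
          exact h ((inter_nonempty_iff ni outs).2 hx)
        simp only [findOverlapLoopA]
        rw [if_neg (by simpa using h)]
        rw [ih]
        constructor
        · rintro ⟨q, hq, hx⟩; exact ⟨q, List.mem_cons_of_mem _ hq, hx⟩
        · rintro ⟨q, hq, hx⟩
          rcases List.mem_cons.1 hq with rfl | hq'
          · exact absurd hx hno
          · exact ⟨q, hq', hx⟩

theorem mem_foldl_update (lo : List (String × List String)) (s0 : PySem.Set String) (y : String) :
    y ∈ lo.foldl (fun s p => PySem.Set.update s p.2) s0 ↔ y ∈ s0 ∨ ∃ p ∈ lo, y ∈ p.2 := by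
  induction lo generalizing s0 with
  | nil => simp
  | cons p rest ih =>
      simp only [List.foldl_cons, ih, PySem.Set.mem_update, List.mem_cons]
      constructor
      · rintro (⟨h | h⟩ | ⟨q, hq, hy⟩)
        · exact Or.inl h
        · exact Or.inr ⟨p, Or.inl rfl, h⟩
        · exact Or.inr ⟨q, Or.inr hq, hy⟩
      · rintro (h | ⟨q, (rfl | hq), hy⟩)
        · exact Or.inl (Or.inl h)
        · exact Or.inl (Or.inr hy)
        · exact Or.inr ⟨q, hq, hy⟩

theorem altB_iff (ni : List String) (lo : List (String × List String)) :
    find_overlap_with_output_alt ni lo = true ↔ ∃ x, x ∈ ni ∧ ∃ p ∈ lo, x ∈ p.2 := by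
  unfold find_overlap_with_output_alt
  rw [Bool.not_eq_eq_eq_not, Bool.not_true, List.isEmpty_eq_false_iff,
    ne_nil_iff_exists_mem']
  constructor
  · rintro ⟨x, hx⟩
    have hmem := (PySem.Set.mem_inter _ _ _).1 hx
    have h2 := (mem_foldl_update lo PySem.Set.empty x).1 hmem.2
    rcases h2 with h | h
    · simp [PySem.Set.empty] at h
    · exact ⟨x, (PySem.Set.mem_ofList _ _).1 hmem.1, h⟩
  · rintro ⟨x, hni, hout⟩
    exact ⟨x, (PySem.Set.mem_inter _ _ _).2 ⟨(PySem.Set.mem_ofList _ _).2 hni,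
      (mem_foldl_update lo PySem.Set.empty x).2 (Or.inr hout)⟩⟩

-- ===== VERDICT (by name: the statement is the Claim_ definition above) =====
theorem find_overlap_with_output_spec : Claim_equal_find_overlap_with_output := by
  intro ni lo _
  unfold Spec_find_overlap_with_output
  have := (loopA_iff ni lo)
  have hb := (altB_iff ni lo)
  apply Bool.eq_iff_iff.mpr
  rw [show find_overlap_with_output ni lo = findOverlapLoopA ni lo from rfl, this, hb]
  constructor
  · rintro ⟨p, hp, x, hx, hxo⟩; exact ⟨x, hx, p, hp, hxo⟩
  · rintro ⟨x, hx, p, hp, hxo⟩; exact ⟨p, hp, x, hx, hxo⟩
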